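-- pv_equiv track=rewrite | github.com/autoplug/Assessment | jan 30,2023/test1.py | solution
-- ===== SOURCE A (Python) =====
-- def solution(S):
--     count = 0
--     similar = 1
--     similar_list = []
--     for idx in range(1, len(S)):
--         if S[idx] == S[idx-1]:
--             similar += 1
--         elif similar > 2:
--             similar_list.append(similar)
--             similar = 1
--         else:
--             similar = 1
--     similar_list.append(similar)
--     for item in similar_list:
--         count += item//3
--     return count
-- ===== SOURCE B (Python) =====
-- def solution(S):
--     n = len(S)
--     cuts = [0] + [i for i in range(1, n) if S[i] != S[i-1]] + [n]
--     return sum((b - a) // 3 for a, b in zip(cuts, cuts[1:]))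
-- ===== Notes on version B (the rewrite author's own statement) =====
-- stated objective: alternative
-- what changed: Replaces A's single-pass state machine (a 'similar' counter flushed into similar_list, then summed) with staged passes: first collect the change-point indices where S[i] != S[i-1], then read each run length off as the difference of consecutive boundaries via zip(cuts, cuts[1:]) and sum (b-a)//3.
import Mathlib
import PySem

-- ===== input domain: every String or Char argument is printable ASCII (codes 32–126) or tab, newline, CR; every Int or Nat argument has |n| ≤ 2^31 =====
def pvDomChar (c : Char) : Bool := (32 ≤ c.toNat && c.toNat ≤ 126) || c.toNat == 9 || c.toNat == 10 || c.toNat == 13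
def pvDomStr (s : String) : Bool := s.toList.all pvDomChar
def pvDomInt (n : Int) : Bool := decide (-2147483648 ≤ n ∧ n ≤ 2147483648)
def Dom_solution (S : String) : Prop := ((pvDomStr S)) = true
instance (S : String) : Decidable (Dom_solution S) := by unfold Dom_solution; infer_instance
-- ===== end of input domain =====

-- B replaces A's single-pass state machine with staged passes: collect change-point
-- indices, then sum (b-a)//3 over consecutive boundary pairs (objective: alternative).


-- ===== PORT A =====
-- loop body of A's 'for idx in range(1, len(S))'
def pvBodyA (L : List Char) (st : Int × List Int) (idx : Int) : Int × List Int :=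
  if PySem.List.pyGet? L idx == PySem.List.pyGet? L (idx - 1) then (st.1 + 1, st.2)
  else if st.1 > 2 then (1, st.2 ++ [st.1])
  else (1, st.2)

def solution (S : String) : Int :=
  let L := S.toList
  let st := (PySem.List.pyRange 1 (L.length : Int) 1).foldl (pvBodyA L) (1, [])
  let similar_list := st.2 ++ [st.1]
  similar_list.foldl (fun count item => count + PySem.Int.floordiv item 3) (0 : Int)

-- ===== PORT B =====
def solution_alt (S : String) : Int :=
  let L := S.toList
  let n : Int := L.length
  let cuts : List Int :=
    0 :: ((PySem.List.pyRange 1 n 1).filter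
            (fun i => !(PySem.List.pyGet? L i == PySem.List.pyGet? L (i - 1)))) ++ [n]
  (cuts.zip (PySem.List.slice cuts (some 1) none)).foldl
    (fun acc ab => acc + PySem.Int.floordiv (ab.2 - ab.1) 3) 0

-- ===== PRECONDITION & SPEC =====
def Spec_solution (S : String) (out : Int) : Prop := out = solution_alt S
instance (S : String) (out : Int) : Decidable (Spec_solution S out) := by unfold Spec_solution; infer_instance

-- ===== CLAIM (what is proved, stated in full; the proofs are below) =====
def Claim_equal_solution : Prop := ∀ (S : String), Dom_solution S → Spec_solution S (solution S)

-- ===== LEMMAS AND PROOFS =====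

-- Common abstract value: run-by-run recursion both ports are reduced to.
-- inner run scan: length of the leading run of c, plus the rest
def pvRunB (c : Char) : List Char → Nat × List Char
  | [] => (0, [])
  | d :: ds => if d = c then ((pvRunB c ds).1 + 1, (pvRunB c ds).2) else (0, d :: ds)

theorem pvRunB_len_le (c : Char) : ∀ (l : List Char), (pvRunB c l).2.length ≤ l.length := by
  intro l; induction l with
  | nil => simp [pvRunB]
  | cons d ds ih =>
    simp only [pvRunB]
    split_ifs with h
    · simp only [List.length_cons]; omega
    · simp

def pvOuterB : List Char → Int
  | [] => 0
  | c :: cs =>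
    PySem.Int.floordiv (((pvRunB c cs).1 + 1 : Nat) : Int) 3 + pvOuterB (pvRunB c cs).2
termination_by l => l.length
decreasing_by
  have := pvRunB_len_le c cs; simp; omega

theorem pvRunB_replicate (p : Char) : ∀ (m : Nat) (l : List Char),
    (l = [] ∨ ∃ d ds, l = d :: ds ∧ d ≠ p) →
    pvRunB p (List.replicate m p ++ l) = (m, l) := by
  intro m
  induction m with
  | zero =>
    intro l hl
    rcases hl with h | ⟨d, ds, rfl, hd⟩
    · subst h; simp [pvRunB]
    · simp [pvRunB, hd]
  | succ m ih =>
    intro l hl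
    simp [List.replicate_succ, pvRunB, ih l hl]

-- ---------- A side ----------
-- A's loop rewritten as structural recursion: p = previous char, s = similar, acc = similar_list
def loopA : Char → Int → List Int → List Char → Int × List Int
  | _, s, acc, [] => (s, acc)
  | p, s, acc, c :: cs =>
    if c = p then loopA c (s + 1) acc cs
    else if s > 2 then loopA c 1 (acc ++ [s]) cs
    else loopA c 1 acc cs

def sumF (xs : List Int) : Int := (xs.map (fun it => PySem.Int.floordiv it 3)).sum

def countA (p : Char) (s : Int) (cs : List Char) : Int :=
  sumF ((loopA p s [] cs).2 ++ [(loopA p s [] cs).1])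

theorem sumF_foldl (xs : List Int) (init : Int) :
    xs.foldl (fun count item => count + PySem.Int.floordiv item 3) init = init + sumF xs := by
  induction xs generalizing init with
  | nil => simp [sumF]
  | cons x xs ih =>
    simp only [List.foldl_cons]
    rw [ih]
    simp [sumF, List.map_cons, List.sum_cons]
    ring

theorem loopA_acc : ∀ (cs : List Char) (p : Char) (s : Int) (acc : List Int),
    (loopA p s acc cs).1 = (loopA p s [] cs).1 ∧
    (loopA p s acc cs).2 = acc ++ (loopA p s [] cs).2 := by
  intro cs
  induction cs with
  | nil => intro p s acc; simp [loopA]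
  | cons c cs ih =>
    intro p s acc
    simp only [loopA]
    split_ifs with h1 h2
    · exact ih c (s + 1) acc
    · simp only [List.nil_append]
      obtain ⟨f1, f2⟩ := ih c 1 (acc ++ [s])
      obtain ⟨g1, g2⟩ := ih c 1 [s]
      exact ⟨f1.trans g1.symm, by rw [f2, g2]; simp⟩
    · exact ih c 1 acc

theorem bridgeA : ∀ (cs pre : List Char) (p : Char) (s : Int) (acc : List Int),
    (PySem.List.pyRange ((pre.length : Int) + 1) (((pre ++ p :: cs).length : Int)) 1).foldl
      (pvBodyA (pre ++ p :: cs)) (s, acc) = loopA p s acc cs := by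
  intro cs
  induction cs with
  | nil =>
    intro pre p s acc
    rw [PySem.List.pyRange_one_eq_nil (by simp)]
    simp [loopA]
  | cons c cs ih =>
    intro pre p s acc
    rw [PySem.List.pyRange_one_cons (by push_cast [List.length_append, List.length_cons, List.length_nil]; omega)]
    simp only [List.foldl_cons]
    have hgetp : PySem.List.pyGet? (pre ++ p :: c :: cs) ((pre.length : Int) + 1 - 1) = some p := by
      have h1 := PySem.List.pyGet?_append_length pre (c :: cs) p
      simp only [add_sub_cancel_right]
      exact h1
    have hgetc : PySem.List.pyGet? (pre ++ p :: c :: cs) ((pre.length : Int) + 1) = some c := by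
      have : pre ++ p :: c :: cs = (pre ++ [p]) ++ c :: cs := by simp
      rw [this]
      have h2 := PySem.List.pyGet?_append_length (pre ++ [p]) cs c
      simp only [List.length_append, List.length_cons, List.length_nil, Nat.cast_add,
        Nat.cast_one, zero_add] at h2
      exact h2
    have hL : pre ++ p :: c :: cs = (pre ++ [p]) ++ c :: cs := by simp
    have hlen : (pre.length : Int) + 1 + 1 = (((pre ++ [p]).length : Int) + 1) := by push_cast [List.length_append, List.length_cons, List.length_nil]; omega
    have hIH := ih (pre ++ [p]) c
    simp only [pvBodyA, hgetp, hgetc]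
    by_cases hc : c = p
    · subst hc
      simp only [beq_self_eq_true, if_true]
      rw [hlen, hL, hIH]
      simp [loopA]
    · have : (some c == some p) = false := by simp [hc]
      rw [this]
      simp only [Bool.false_eq_true, if_false, loopA, if_neg hc]
      split_ifs with h2 <;> (rw [hlen, hL, hIH])

-- A's count from state (p, s=n) on suffix cs equals the run-by-run value of the
-- string that still starts with a run of n copies of p
theorem mainA (cs : List Char) : ∀ (p : Char) (n : Nat), 1 ≤ n →
    countA p (n : Int) cs = pvOuterB (List.replicate n p ++ cs) := by
  induction cs with
  | nil =>
    intro p n hn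
    obtain ⟨m, rfl⟩ : ∃ m, n = m + 1 := ⟨n - 1, by omega⟩
    have hr := pvRunB_replicate p m [] (Or.inl rfl)
    simp only [List.append_nil] at hr ⊢
    rw [List.replicate_succ, pvOuterB, hr]
    simp [countA, loopA, sumF, pvOuterB]
  | cons c cs ih =>
    intro p n hn
    by_cases hc : c = p
    · subst hc
      have h1 : countA c (n : Int) (c :: cs) = countA c ((n + 1 : Nat) : Int) cs := by
        simp [countA, loopA]
      rw [h1, ih c (n + 1) (by omega)]
      congr 1
      rw [List.replicate_succ']
      simp
    · obtain ⟨m, rfl⟩ : ∃ m, n = m + 1 := ⟨n - 1, by omega⟩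
      have hflush : countA p ((m + 1 : Nat) : Int) (c :: cs) =
          PySem.Int.floordiv ((m + 1 : Nat) : Int) 3 + countA c 1 cs := by
        simp only [countA, loopA, if_neg hc, List.nil_append]
        split_ifs with h2
        · obtain ⟨f1, f2⟩ := loopA_acc cs c 1 [((m + 1 : Nat) : Int)]
          rw [f1, f2]
          simp [sumF]
        · have hm : m = 0 ∨ m = 1 := by omega
          have h0 : PySem.Int.floordiv ((m + 1 : Nat) : Int) 3 = 0 := by
            rcases hm with rfl | rfl <;> decide
          rw [h0]; simp [sumF]
      have hih := ih c 1 (by omega)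
      simp only [Nat.cast_one, List.replicate_one, List.singleton_append] at hih
      rw [hflush, hih]
      have hrhs : pvOuterB (List.replicate (m + 1) p ++ c :: cs) =
          PySem.Int.floordiv ((m + 1 : Nat) : Int) 3 + pvOuterB (c :: cs) := by
        rw [List.replicate_succ, List.cons_append, pvOuterB,
            pvRunB_replicate p m (c :: cs) (Or.inr ⟨c, cs, rfl, hc⟩)]
      rw [hrhs]

-- ---------- B side ----------
-- B's change-point comprehension as structural recursion: p = previous char, k = next index
def cutsB : Char → Nat → List Char → List Int
  | _, _, [] => []
  | p, k, c :: cs => if c = p then cutsB c (k + 1) cs else (k : Int) :: cutsB c (k + 1) cs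

-- telescoped pair sum: g a [b1, b2, …] = (b1-a)//3 + (b2-b1)//3 + …
def gB : Int → List Int → Int
  | _, [] => 0
  | a, b :: r => PySem.Int.floordiv (b - a) 3 + gB b r

theorem zipfold_gB : ∀ (xs : List Int) (a init : Int),
    ((a :: xs).zip xs).foldl (fun acc ab => acc + PySem.Int.floordiv (ab.2 - ab.1) 3) init
      = init + gB a xs := by
  intro xs
  induction xs with
  | nil => intro a init; simp [gB]
  | cons b r ih =>
    intro a init
    simp only [List.zip_cons_cons, List.foldl_cons, gB]
    rw [ih b]
    ring

theorem bridgeB : ∀ (cs pre : List Char) (p : Char),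
    (PySem.List.pyRange ((pre.length : Int) + 1) (((pre ++ p :: cs).length : Int)) 1).filter
      (fun i => !(PySem.List.pyGet? (pre ++ p :: cs) i == PySem.List.pyGet? (pre ++ p :: cs) (i - 1)))
      = cutsB p (pre.length + 1) cs := by
  intro cs
  induction cs with
  | nil =>
    intro pre p
    rw [PySem.List.pyRange_one_eq_nil (by simp)]
    simp [cutsB]
  | cons c cs ih =>
    intro pre p
    rw [PySem.List.pyRange_one_cons (by push_cast [List.length_append, List.length_cons, List.length_nil]; omega)]
    rw [List.filter_cons]
    have hgetp : PySem.List.pyGet? (pre ++ p :: c :: cs) ((pre.length : Int) + 1 - 1) = some p := by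
      have h1 := PySem.List.pyGet?_append_length pre (c :: cs) p
      simp only [add_sub_cancel_right]
      exact h1
    have hgetc : PySem.List.pyGet? (pre ++ p :: c :: cs) ((pre.length : Int) + 1) = some c := by
      have : pre ++ p :: c :: cs = (pre ++ [p]) ++ c :: cs := by simp
      rw [this]
      have h2 := PySem.List.pyGet?_append_length (pre ++ [p]) cs c
      simp only [List.length_append, List.length_cons, List.length_nil, Nat.cast_add,
        Nat.cast_one, zero_add] at h2
      exact h2
    have hL : pre ++ p :: c :: cs = (pre ++ [p]) ++ c :: cs := by simp
    have hlen : (pre.length : Int) + 1 + 1 = (((pre ++ [p]).length : Int) + 1) := by push_cast [List.length_append, List.length_cons, List.length_nil]; omega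
    have hlen' : pre.length + 1 + 1 = (pre ++ [p]).length + 1 := by simp
    have hIH := ih (pre ++ [p]) c
    simp only [hgetp, hgetc]
    by_cases hc : c = p
    · subst hc
      simp only [beq_self_eq_true, Bool.not_true, Bool.false_eq_true, if_false, cutsB]
      rw [hlen, hL, hIH, hlen']
      simp
    · have hbe : (some c == some p) = false := by simp [hc]
      simp only [hbe, Bool.not_false, if_true, cutsB, if_neg hc]
      rw [hlen, hL, hIH, hlen']
      simp

-- B's staged value equals the run-by-run value: a < k are boundaries, cs the suffix
-- after index k-1, and the string from a on starts with k-a copies of p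
theorem mainB (cs : List Char) : ∀ (p : Char) (a k : Nat), a < k →
    gB (a : Int) (cutsB p k cs ++ [((k + cs.length : Nat) : Int)])
      = pvOuterB (List.replicate (k - a) p ++ cs) := by
  induction cs with
  | nil =>
    intro p a k hak
    obtain ⟨m, hm⟩ : ∃ m, k - a = m + 1 := ⟨k - a - 1, by omega⟩
    have hr := pvRunB_replicate p m [] (Or.inl rfl)
    simp only [List.append_nil] at hr
    rw [hm]
    simp only [cutsB, List.nil_append, List.append_nil, gB]
    rw [List.replicate_succ, pvOuterB, hr]
    simp only [pvOuterB, add_zero, List.length_nil]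
    congr 1
    push_cast
    omega
  | cons c cs ih =>
    intro p a k hak
    by_cases hc : c = p
    · subst hc
      simp only [cutsB, if_pos trivial]
      have h1 : k + (c :: cs).length = (k + 1) + cs.length := by simp; omega
      rw [h1, ih c a (k + 1) (by omega)]
      have h2 : List.replicate (k - a) c ++ c :: cs = List.replicate (k + 1 - a) c ++ cs := by
        have : k + 1 - a = (k - a) + 1 := by omega
        rw [this, List.replicate_succ']
        simp
      rw [h2]
    · simp only [cutsB, if_neg hc, List.cons_append, gB]
      have h1 : k + (c :: cs).length = (k + 1) + cs.length := by simp; omega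
      rw [h1, ih c k (k + 1) (by omega)]
      obtain ⟨m, hm⟩ : ∃ m, k - a = m + 1 := ⟨k - a - 1, by omega⟩
      rw [hm]
      have h3 : k + 1 - k = 1 := by omega
      rw [h3]
      simp only [List.replicate_one, List.singleton_append]
      have hrhs : pvOuterB (List.replicate (m + 1) p ++ c :: cs) =
          PySem.Int.floordiv ((m + 1 : Nat) : Int) 3 + pvOuterB (c :: cs) := by
        rw [List.replicate_succ, List.cons_append, pvOuterB,
            pvRunB_replicate p m (c :: cs) (Or.inr ⟨c, cs, rfl, hc⟩)]
      rw [hrhs]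
      congr 1
      congr 1
      push_cast
      omega

-- ===== VERDICT (by name: the statement is the Claim_ definition above) =====
theorem solution_spec : Claim_equal_solution := by
  intro S _
  unfold Spec_solution
  cases hL : S.toList with
  | nil =>
    simp [solution, solution_alt, hL, PySem.List.pyRange_one_eq_nil,
      PySem.List.slice_from_one, PySem.Int.floordiv]
  | cons c cs =>
    -- A side
    have hb := bridgeA cs [] c 1 []
    simp only [List.nil_append, List.length_nil, Nat.cast_zero, zero_add] at hb
    have hm := mainA cs c 1 (le_refl 1)
    simp only [List.replicate_one, List.singleton_append] at hm
    -- B side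
    have hbB := bridgeB cs [] c
    simp only [List.nil_append, List.length_nil, Nat.cast_zero, zero_add] at hbB
    have hmB := mainB cs c 0 1 (by omega)
    simp only [Nat.cast_zero, Nat.sub_zero, List.replicate_one, List.singleton_append] at hmB
    simp only [solution, solution_alt, hL, hb, hbB]
    rw [sumF_foldl, zero_add, PySem.List.slice_from_one]
    rw [show List.tail (0 :: cutsB c 1 cs ++ [((c :: cs).length : Int)])
          = cutsB c 1 cs ++ [((c :: cs).length : Int)] from rfl]
    rw [List.cons_append, zipfold_gB, zero_add]
    have hcuts : cutsB c (0 + 1) cs ++ [((c :: cs).length : Int)]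
        = cutsB c 1 cs ++ [((1 + cs.length : Nat) : Int)] := by
      congr 1
      congr 1
      simp only [List.length_cons]
      push_cast
      omega
    rw [hcuts, hmB]
    simpa [countA] using hm
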